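-- pv_equiv track=rewrite | github.com/dwlee1/ARP_convert | tools/fbx_preprocess.py | find_orphan_bones
-- ===== SOURCE A (Python) =====
-- def find_orphan_bones(bones: dict[str, dict]) -> list[str]:
--     """parent=None인 본이 2개 이상이면 primary root를 제외한 나머지를 orphan으로 반환.
--
--     Primary root 결정 우선순위:
--     1. 이름이 정확히 `root` 또는 `Root`인 본
--     2. 자손 수가 가장 많은 본 (동률은 이름순)
--     """
--     top_level = [n for n, info in bones.items() if info.get("parent") is None]
--     if len(top_level) <= 1:
--         return []
--
--     named_root = next((n for n in top_level if n in ("root", "Root")), None)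
--     if named_root:
--         primary = named_root
--     else:
--         descendant_counts = {n: _count_descendants(bones, n) for n in top_level}
--         primary = max(top_level, key=lambda n: (descendant_counts[n], -ord(n[0]) if n else 0))
--
--     return sorted(n for n in top_level if n != primary)
--
-- def _count_descendants(bones: dict[str, dict], root: str) -> int:
--     children_map: dict[str, list[str]] = {}
--     for name, info in bones.items():
--         parent = info.get("parent")
--         if parent is not None:
--             children_map.setdefault(parent, []).append(name)
--
--     count = 0
--     stack = [root]
--     while stack:
--         node = stack.pop()
--         for child in children_map.get(node, []):
--             count += 1
--             stack.append(child)
--     return count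
-- ===== SOURCE B (Python) =====
-- def find_orphan_bones(bones: dict[str, dict]) -> list[str]:
--     """Same result as the original, but descendant counts are computed by walking
--     each bone's parent chain UPWARD to its root (no children index, no stack):
--     every bone charges itself to the root its chain reaches, so all roots'
--     descendant counts are produced by one sweep over the bones."""
--     top_level = [n for n, info in bones.items() if info.get("parent") is None]
--     if len(top_level) <= 1:
--         return []
--
--     for n in top_level:
--         if n in ("root", "Root"):
--             primary = n
--             break
--     else:
--         counts = {n: 0 for n in top_level}
--         limit = len(bones) + 1
--         for n in bones:
--             r = _chain_root(bones, n, limit)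
--             if r is not None and r != n:
--                 counts[r] += 1
--         primary = max(top_level, key=lambda n: (counts[n], -ord(n[0]) if n else 0))
--
--     return sorted(n for n in top_level if n != primary)
--
--
-- def _chain_root(bones: dict[str, dict], name: str, limit: int):
--     """Follow parent links from `name`; the bone with parent None that the chain
--     ends at, or None if the chain leaves the skeleton or is cyclic."""
--     cur = name
--     for _ in range(limit):
--         info = bones.get(cur)
--         if info is None:
--             return None
--         parent = info.get("parent")
--         if parent is None:
--             return cur
--         cur = parent
--     return None  # parent links form a cycle
-- ===== Notes on version B (the rewrite author's own statement) =====
-- stated objective: faster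
-- what changed: A builds a parent->children index and counts each candidate root's descendants by a downward explicit-stack DFS, rebuilding the whole index from scratch for every top-level bone; B builds no children index at all and traverses in the opposite direction: one sweep walks every bone's parent chain upward to its root and charges the bone to that root, producing all roots' descendant counts at once.
import Mathlib
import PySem

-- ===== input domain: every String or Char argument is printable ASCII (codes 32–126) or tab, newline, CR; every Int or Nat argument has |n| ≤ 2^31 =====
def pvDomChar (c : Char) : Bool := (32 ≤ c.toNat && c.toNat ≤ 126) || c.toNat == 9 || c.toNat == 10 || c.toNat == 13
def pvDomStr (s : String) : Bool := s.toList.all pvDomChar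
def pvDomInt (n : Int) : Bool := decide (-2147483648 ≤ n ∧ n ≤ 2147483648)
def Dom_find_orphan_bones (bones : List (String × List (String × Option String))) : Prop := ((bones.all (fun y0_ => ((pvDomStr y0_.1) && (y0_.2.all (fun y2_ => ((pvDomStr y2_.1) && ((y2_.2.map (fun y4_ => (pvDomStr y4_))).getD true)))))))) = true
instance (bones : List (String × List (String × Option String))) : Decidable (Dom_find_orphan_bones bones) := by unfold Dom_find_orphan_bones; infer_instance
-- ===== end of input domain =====

-- B removes A's parent->children index and downward stack-DFS altogether: one sweep
-- walks every bone's parent chain UPWARD to its root and charges the bone to that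
-- root, producing all roots' descendant counts at once; return values agree.

-- shared helper: both Pythons compute `info.get("parent")` (None if the key is absent)
def pyParent (info : List (String × Option String)) : Option String :=
  (PySem.Dict.mk info).getD "parent" none

-- shared helper: both Pythons compute the tiebreak key `-ord(n[0]) if n else 0`
def negOrd (n : String) : Int :=
  match n.toList with
  | c :: _ => -(c.toNat : Int)
  | [] => 0

-- ===== PORT A =====

-- the children_map loop of `_count_descendants` (dict.setdefault(parent, []).append(name))
def buildChildren (bones : List (String × List (String × Option String))) :
    PySem.Dict String (List String) :=
  bones.foldl
    (fun m p =>
      match pyParent p.2 with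
      | none => m
      | some par => m.modify par [] (· ++ [p.1]))
    PySem.Dict.empty

-- the `while stack:` loop of `_count_descendants`: pop a node, then
-- `for child in children_map.get(node, []): count += 1; stack.append(child)`.
-- The Lean list's head is the Python list's END (its pop/append side), so the visit
-- order is exactly Python's; fuel `bones.length + 1` bounds the iterations, since under
-- Pre_ every bone is pushed at most once (each bone has one parent entry).
def dfsA (m : PySem.Dict String (List String)) :
    Nat → List String → Int → Int
  | 0, _, count => count
  | _ + 1, [], count => count
  | fuel + 1, node :: rest, count =>
    let cs := m.getD node []
    let s := cs.foldl (fun (s : Int × List String) child => (s.1 + 1, child :: s.2)) (count, rest)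
    dfsA m fuel s.2 s.1

def count_descendants (bones : List (String × List (String × Option String)))
    (root : String) : Int :=
  dfsA (buildChildren bones) (bones.length + 1) [root] 0

def find_orphan_bones (bones : List (String × List (String × Option String))) : List String :=
  let top_level := (bones.filter (fun p => (pyParent p.2).isNone)).map Prod.fst
  if top_level.length ≤ 1 then []
  else
    let primary :=
      -- `next((n for n in top_level if n in ("root", "Root")), None)`; a found value is
      -- "root"/"Root", both truthy, so Python's `if named_root:` is `isSome` here
      match top_level.find? (fun n => n == "root" || n == "Root") with
      | some nr => nr
      | none =>
        -- `{n: _count_descendants(bones, n) for n in top_level}`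
        let dcounts : PySem.Dict String Int :=
          top_level.foldl (fun d n => d.insert n (count_descendants bones n)) PySem.Dict.empty
        -- `max(top_level, key=lambda n: (descendant_counts[n], -ord(n[0]) if n else 0))`;
        -- top_level has ≥ 2 elements here, so Python's max never sees an empty sequence
        -- and `descendant_counts[n]` never raises (n is a key) — getD 0 is exact
        match PySem.List.max2? top_level (fun n => dcounts.getD n 0) negOrd with
        | some p => p
        | none => ""
    PySem.List.sorted (top_level.filter (fun n => !(n == primary))) (fun s => s)

-- ===== PORT B =====

-- the `for n in top_level: if n in ("root", "Root"): primary = n; break` loop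
def findRoot : List String → Option String
  | [] => none
  | n :: rest => if n == "root" || n == "Root" then some n else findRoot rest

-- `_chain_root(bones, name, limit)`: follow parent links upward for at most `limit`
-- steps; `some cur` when a bone with parent None is reached, `none` when the chain
-- leaves the skeleton or the step budget (a cycle) is exhausted
def chain_root (bones : List (String × List (String × Option String))) :
    Nat → String → Option String
  | 0, _ => none
  | f + 1, cur =>
    match (PySem.Dict.mk bones).get? cur with
    | none => none
    | some info =>
      match pyParent info with
      | none => some cur
      | some p => chain_root bones f p

def find_orphan_bones_alt (bones : List (String × List (String × Option String))) : List String :=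
  let top_level := (bones.filter (fun p => (pyParent p.2).isNone)).map Prod.fst
  if top_level.length ≤ 1 then []
  else
    let primary :=
      match findRoot top_level with
      | some n => n
      | none =>
        -- `counts = {n: 0 for n in top_level}`, then one sweep over the bones:
        -- `r = _chain_root(bones, n, limit); if r is not None and r != n: counts[r] += 1`
        -- (the incremented key always has parent None, so it is present in counts)
        let counts0 : PySem.Dict String Int :=
          top_level.foldl (fun d n => d.insert n 0) PySem.Dict.empty
        let counts : PySem.Dict String Int :=
          bones.foldl
            (fun d p =>
              match chain_root bones (bones.length + 1) p.1 with
              | some r => if r != p.1 then d.modify r 0 (· + 1) else d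
              | none => d)
            counts0
        match PySem.List.max2? top_level (fun n => counts.getD n 0) negOrd with
        | some p => p
        | none => ""
    PySem.List.sorted (top_level.filter (fun n => !(n == primary))) (fun s => s)

-- ===== PRECONDITION & SPEC =====
-- Pre_ excludes association lists with duplicate keys (duplicate bone names, or a
-- duplicate key inside one bone's info dict): such lists denote no Python dict[str, dict],
-- so neither Python ever receives them; A's behaviour on them is accidental.
def Pre_find_orphan_bones (bones : List (String × List (String × Option String))) : Prop :=
  (bones.map Prod.fst).Nodup ∧ ∀ info ∈ bones.map Prod.snd, (info.map Prod.fst).Nodup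

instance (bones : List (String × List (String × Option String))) :
    Decidable (Pre_find_orphan_bones bones) := by unfold Pre_find_orphan_bones; infer_instance

def pvWitness_find_orphan_bones : (List (String × List (String × Option String))) :=
  [("pelvis", [("parent", none)]),
   ("spine", [("parent", some "pelvis")]),
   ("stray", [("parent", none)])]

def Spec_find_orphan_bones (bones : List (String × List (String × Option String))) (out : List String) : Prop := out = find_orphan_bones_alt bones
instance (bones : List (String × List (String × Option String))) (out : List String) : Decidable (Spec_find_orphan_bones bones out) := by unfold Spec_find_orphan_bones; infer_instance

-- ===== CLAIM (what is proved, stated in full; the proofs are below) =====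
def Claim_equal_find_orphan_bones : Prop := ∀ (bones : List (String × List (String × Option String))), Dom_find_orphan_bones bones → Pre_find_orphan_bones bones → Spec_find_orphan_bones bones (find_orphan_bones bones)

-- ===== LEMMAS AND PROOFS =====

-- ---- proof-only vocabulary and the chain/subtree theory ----

def chainL (bones : List (String × List (String × Option String))) :
    Nat → String → Option (List String)
  | 0, _ => none
  | f + 1, cur =>
    match (PySem.Dict.mk bones).get? cur with
    | none => none
    | some info =>
      match pyParent info with
      | none => some [cur]
      | some p => (chainL bones f p).map (cur :: ·)

theorem chainL_mono (bones : List (String × List (String × Option String))) :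
    ∀ (f : Nat) (n : String) (l : List String), chainL bones f n = some l →
      ∀ g, f ≤ g → chainL bones g n = some l := by
  intro f
  induction f with
  | zero => intro n l h; simp [chainL] at h
  | succ f ih =>
    intro n l h g hg
    match g, hg with
    | g + 1, hg =>
      cases hi : (PySem.Dict.mk bones).get? n with
      | none => simp [chainL, hi] at h
      | some info =>
        cases hp : pyParent info with
        | none => simp only [chainL, hi, hp] at h ⊢; exact h
        | some p =>
          simp only [chainL, hi, hp] at h ⊢
          cases hc : chainL bones f p with
          | none => simp [hc] at h
          | some l' =>
            simp only [hc, Option.map_some] at h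
            rw [ih p l' hc g (by omega)]
            simpa using h

theorem chainL_head (bones : List (String × List (String × Option String)))
    (f : Nat) (n : String) (l : List String) (h : chainL bones f n = some l) :
    ∃ t, l = n :: t := by
  match f with
  | 0 => simp [chainL] at h
  | f + 1 =>
    cases hi : (PySem.Dict.mk bones).get? n with
    | none => simp [chainL, hi] at h
    | some info =>
      cases hp : pyParent info with
      | none =>
        simp only [chainL, hi, hp, Option.some.injEq] at h; exact ⟨[], h.symm⟩
      | some p =>
        simp only [chainL, hi, hp] at h
        cases hc : chainL bones f p with
        | none => simp [hc] at h
        | some l' => simp only [hc, Option.map_some, Option.some.injEq] at h; exact ⟨l', h.symm⟩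

theorem chainL_min_fuel (bones : List (String × List (String × Option String))) :
    ∀ (f : Nat) (n : String) (l : List String), chainL bones f n = some l →
      chainL bones l.length n = some l := by
  intro f
  induction f with
  | zero => intro n l h; simp [chainL] at h
  | succ f ih =>
    intro n l h
    cases hi : (PySem.Dict.mk bones).get? n with
    | none => simp [chainL, hi] at h
    | some info =>
      cases hp : pyParent info with
      | none =>
        simp only [chainL, hi, hp] at h
        obtain rfl : [n] = l := by simpa using h
        simp [chainL, hi, hp]
      | some p =>
        simp only [chainL, hi, hp] at h
        cases hc : chainL bones f p with
        | none => simp [hc] at h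
        | some l' =>
          simp only [hc, Option.map_some, Option.some.injEq] at h
          obtain rfl : n :: l' = l := h
          have := ih p l' hc
          simp only [List.length_cons]
          simp [chainL, hi, hp, this]

theorem chainL_subset_names (bones : List (String × List (String × Option String))) :
    ∀ (f : Nat) (n : String) (l : List String), chainL bones f n = some l →
      ∀ x ∈ l, x ∈ bones.map Prod.fst := by
  intro f
  induction f with
  | zero => intro n l h; simp [chainL] at h
  | succ f ih =>
    intro n l h x hx
    cases hi : (PySem.Dict.mk bones).get? n with
    | none => simp [chainL, hi] at h
    | some info =>
      have hn : n ∈ bones.map Prod.fst := by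
        have := PySem.Dict.mem_items_of_get?_eq_some (d := PySem.Dict.mk bones) (k := n) (v := info) hi
        exact List.mem_map_of_mem (f := Prod.fst) this
      cases hp : pyParent info with
      | none =>
        simp only [chainL, hi, hp, Option.some.injEq] at h
        obtain rfl : [n] = l := by simpa using h
        rcases List.mem_cons.mp hx with rfl | h'
        · exact hn
        · simp at h'
      | some p =>
        simp only [chainL, hi, hp] at h
        cases hc : chainL bones f p with
        | none => simp [hc] at h
        | some l' =>
          simp only [hc, Option.map_some, Option.some.injEq] at h
          obtain rfl : n :: l' = l := h
          rcases List.mem_cons.mp hx with rfl | h'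
          · exact hn
          · exact ih p l' hc x h'

theorem chainL_suffix (bones : List (String × List (String × Option String))) :
    ∀ (f : Nat) (n : String) (l : List String), chainL bones f n = some l →
      ∀ c ∈ l, ∃ g lc, g ≤ f ∧ chainL bones g c = some lc ∧ lc <:+ l := by
  intro f
  induction f with
  | zero => intro n l h; simp [chainL] at h
  | succ f ih =>
    intro n l h c hc
    cases hi : (PySem.Dict.mk bones).get? n with
    | none => simp [chainL, hi] at h
    | some info =>
      cases hp : pyParent info with
      | none =>
        simp only [chainL, hi, hp, Option.some.injEq] at h
        obtain rfl : [n] = l := by simpa using h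
        rcases List.mem_cons.mp hc with rfl | h'
        · exact ⟨f + 1, [c], le_refl _, by simp [chainL, hi, hp], List.suffix_refl _⟩
        · simp at h'
      | some p =>
        simp only [chainL, hi, hp] at h
        cases hcc : chainL bones f p with
        | none => simp [hcc] at h
        | some l' =>
          simp only [hcc, Option.map_some, Option.some.injEq] at h
          obtain rfl : n :: l' = l := h
          rcases List.mem_cons.mp hc with rfl | h'
          · exact ⟨f + 1, c :: l', le_refl _, by simp [chainL, hi, hp, hcc], List.suffix_refl _⟩
          · obtain ⟨g, lc, hg, hgl, hsuf⟩ := ih p l' hcc c h'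
            exact ⟨g, lc, by omega, hgl, hsuf.trans (List.suffix_cons _ _)⟩

theorem chainL_nodup (bones : List (String × List (String × Option String))) :
    ∀ (f : Nat) (n : String) (l : List String), chainL bones f n = some l → l.Nodup := by
  intro f
  induction f with
  | zero => intro n l h; simp [chainL] at h
  | succ f ih =>
    intro n l h
    cases hi : (PySem.Dict.mk bones).get? n with
    | none => simp [chainL, hi] at h
    | some info =>
      cases hp : pyParent info with
      | none =>
        simp only [chainL, hi, hp, Option.some.injEq] at h
        obtain rfl : [n] = l := by simpa using h
        simp
      | some p =>
        simp only [chainL, hi, hp] at h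
        cases hc : chainL bones f p with
        | none => simp [hc] at h
        | some l' =>
          simp only [hc, Option.map_some, Option.some.injEq] at h
          obtain rfl : n :: l' = l := h
          refine List.nodup_cons.mpr ⟨?_, ih p l' hc⟩
          intro hmem
          -- n ∈ l' would make the chain periodic: its suffix chain at n equals the
          -- whole chain, which is longer
          obtain ⟨g, lc, hg, hgl, hsuf⟩ := chainL_suffix bones f p l' hc n hmem
          have h1 : chainL bones (f + 1) n = some lc :=
            chainL_mono bones g n lc hgl (f + 1) (by omega)
          have h2 : chainL bones (f + 1) n = some (n :: l') := by
            simp [chainL, hi, hp, hc]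
          rw [h1] at h2
          have : lc = n :: l' := by simpa using h2
          have hle := hsuf.length_le
          rw [‹lc = n :: l'›] at hle
          simp at hle


theorem chainL_length_le (bones : List (String × List (String × Option String)))
    (f : Nat) (n : String) (l : List String) (h : chainL bones f n = some l) :
    l.length ≤ bones.length := by
  have hnd := chainL_nodup bones f n l h
  have hsub : l ⊆ bones.map Prod.fst := fun x hx => chainL_subset_names bones f n l h x hx
  calc l.length = l.toFinset.card := (List.toFinset_card_of_nodup hnd).symm
    _ ≤ (bones.map Prod.fst).toFinset.card := Finset.card_le_card
        (by intro x hx; simp only [List.mem_toFinset] at *; exact hsub hx)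
    _ ≤ (bones.map Prod.fst).length := (bones.map Prod.fst).toFinset_card_le
    _ = bones.length := List.length_map _

theorem chainL_canon (bones : List (String × List (String × Option String)))
    (f : Nat) (n : String) (l : List String) (h : chainL bones f n = some l) :
    chainL bones (bones.length + 1) n = some l :=
  chainL_mono bones l.length n l (chainL_min_fuel bones f n l h) (bones.length + 1)
    (by have := chainL_length_le bones f n l h; omega)

theorem chain_of_mem (bones : List (String × List (String × Option String)))
    (n : String) (l : List String) (h : chainL bones (bones.length + 1) n = some l)
    (c : String) (hc : c ∈ l) :
    ∃ lc, chainL bones (bones.length + 1) c = some lc ∧ lc <:+ l := by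
  obtain ⟨g, lc, _, hgl, hsuf⟩ := chainL_suffix bones (bones.length + 1) n l h c hc
  exact ⟨lc, chainL_canon bones g c lc hgl, hsuf⟩

theorem chainL_cons (bones : List (String × List (String × Option String)))
    (c x : String) (i : List (String × Option String)) (lx : List String)
    (h : (PySem.Dict.mk bones).get? c = some i) (hp : pyParent i = some x)
    (hx : chainL bones (bones.length + 1) x = some lx) :
    chainL bones (bones.length + 1) c = some (c :: lx) := by
  have hVx : chainL bones bones.length x = some lx :=
    chainL_mono bones lx.length x lx (chainL_min_fuel bones _ x lx hx) bones.length
      (chainL_length_le bones _ x lx hx)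
  simp [chainL, h, hp, hVx]

theorem chainL_root (bones : List (String × List (String × Option String)))
    (r : String) (i : List (String × Option String))
    (h : (PySem.Dict.mk bones).get? r = some i) (hp : pyParent i = none) (f : Nat) :
    chainL bones (f + 1) r = some [r] := by
  simp [chainL, h, hp]

def hitsB (bones : List (String × List (String × Option String))) (n x : String) : Bool :=
  match chainL bones (bones.length + 1) n with
  | some l => decide (x ∈ l.tail)
  | none => false

def cntN (bones : List (String × List (String × Option String))) (x : String) : Nat :=
  (bones.filter (fun b => hitsB bones b.1 x)).length

def childrenOf (bones : List (String × List (String × Option String))) (x : String) :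
    List String :=
  (bones.filter (fun b => pyParent b.2 == some x)).map Prod.fst

theorem hitsB_eq (bones : List (String × List (String × Option String)))
    (n x : String) (l : List String) (h : chainL bones (bones.length + 1) n = some l) :
    hitsB bones n x = decide (x ∈ l.tail) := by
  simp [hitsB, h]

theorem hitsB_of_none (bones : List (String × List (String × Option String)))
    (n x : String) (h : chainL bones (bones.length + 1) n = none) :
    hitsB bones n x = false := by
  simp [hitsB, h]

theorem not_hitsB_self (bones : List (String × List (String × Option String)))
    (c : String) : hitsB bones c c = false := by
  cases h : chainL bones (bones.length + 1) c with
  | none => exact hitsB_of_none bones c c h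
  | some l =>
    rw [hitsB_eq bones c c l h]
    obtain ⟨t, rfl⟩ := chainL_head bones _ c l h
    have hnd := chainL_nodup bones _ c _ h
    simp only [List.tail_cons, decide_eq_false_iff_not]
    exact (List.nodup_cons.mp hnd).1

theorem mem_childrenOf (bones : List (String × List (String × Option String)))
    (hnd : (bones.map Prod.fst).Nodup) (c x : String) :
    c ∈ childrenOf bones x ↔
      ∃ i, (PySem.Dict.mk bones).get? c = some i ∧ pyParent i = some x := by
  constructor
  · intro h
    simp only [childrenOf, List.mem_map, List.mem_filter] at h
    obtain ⟨b, ⟨hb, hpar⟩, rfl⟩ := h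
    refine ⟨b.2, ?_, by simpa using hpar⟩
    exact (PySem.Dict.get?_eq_some_iff_mem_items (PySem.Dict.mk bones) b.1 b.2 hnd).mpr hb
  · rintro ⟨i, hg, hp⟩
    have hb : (c, i) ∈ bones :=
      (PySem.Dict.get?_eq_some_iff_mem_items (PySem.Dict.mk bones) c i hnd).mp hg
    simp only [childrenOf, List.mem_map, List.mem_filter]
    exact ⟨(c, i), ⟨hb, by simp [hp]⟩, rfl⟩

theorem nodup_childrenOf (bones : List (String × List (String × Option String)))
    (hnd : (bones.map Prod.fst).Nodup) (x : String) : (childrenOf bones x).Nodup := by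
  have hsub : (childrenOf bones x).Sublist (bones.map Prod.fst) :=
    (List.filter_sublist).map Prod.fst
  exact hnd.sublist hsub

theorem hits_decompose (bones : List (String × List (String × Option String))) :
    ∀ (f : Nat) (n : String) (l : List String), chainL bones f n = some l →
      ∀ x ∈ l.tail, ∃ c i, (PySem.Dict.mk bones).get? c = some i ∧ pyParent i = some x ∧
        (n = c ∨ hitsB bones n c = true) := by
  intro f
  induction f with
  | zero => intro n l h; simp [chainL] at h
  | succ f ih =>
    intro n l h x hx
    cases hi : (PySem.Dict.mk bones).get? n with
    | none => simp [chainL, hi] at h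
    | some info =>
      cases hp : pyParent info with
      | none =>
        simp only [chainL, hi, hp, Option.some.injEq] at h
        obtain rfl : [n] = l := by simpa using h
        simp at hx
      | some p =>
        simp only [chainL, hi, hp] at h
        cases hc : chainL bones f p with
        | none => simp [hc] at h
        | some l' =>
          simp only [hc, Option.map_some, Option.some.injEq] at h
          obtain rfl : n :: l' = l := h
          simp only [List.tail_cons] at hx
          obtain ⟨t', rfl⟩ := chainL_head bones f p l' hc
          rcases List.mem_cons.mp hx with rfl | hx'
          · -- x = p : the child step is n itself
            exact ⟨n, info, hi, hp, Or.inl rfl⟩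
          · -- x is deeper: use the decomposition of p's chain
            obtain ⟨c, i, hgc, hpc, hrest⟩ := ih p (p :: t') hc x hx'
            refine ⟨c, i, hgc, hpc, Or.inr ?_⟩
            have hcanon : chainL bones (bones.length + 1) n = some (n :: p :: t') :=
              chainL_canon bones (f + 1) n _ (by simp [chainL, hi, hp, hc])
            rw [hitsB_eq bones n c _ hcanon]
            simp only [List.tail_cons, decide_eq_true_eq]
            rcases hrest with rfl | hh
            · exact List.mem_cons_self
            · have hpcanon : chainL bones (bones.length + 1) p = some (p :: t') :=
                chainL_canon bones f p _ hc
              rw [hitsB_eq bones p c _ hpcanon] at hh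
              simp only [List.tail_cons, decide_eq_true_eq] at hh
              exact List.mem_cons_of_mem _ hh

theorem hits_of_child (bones : List (String × List (String × Option String)))
    (c x n : String) (i : List (String × Option String)) (lx : List String)
    (hc : (PySem.Dict.mk bones).get? c = some i) (hp : pyParent i = some x)
    (hx : chainL bones (bones.length + 1) x = some lx)
    (h : n = c ∨ hitsB bones n c = true) : hitsB bones n x = true := by
  have hcc : chainL bones (bones.length + 1) c = some (c :: lx) :=
    chainL_cons bones c x i lx hc hp hx
  obtain ⟨tx, rfl⟩ := chainL_head bones _ x lx hx
  rcases h with rfl | hh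
  · rw [hitsB_eq bones n x _ hcc]
    simp
  · cases hl : chainL bones (bones.length + 1) n with
    | none => rw [hitsB_of_none bones n c hl] at hh; exact absurd hh (by simp)
    | some l =>
      rw [hitsB_eq bones n c l hl] at hh
      simp only [decide_eq_true_eq] at hh
      rw [hitsB_eq bones n x l hl]
      simp only [decide_eq_true_eq]
      -- c ∈ l.tail and chain(c) = c :: x :: tx is a suffix of l, so x ∈ l.tail
      have hcl : c ∈ l := List.mem_of_mem_tail hh
      obtain ⟨lc, hlc, hsuf⟩ := chain_of_mem bones n l hl c hcl
      rw [hcc] at hlc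
      obtain rfl : lc = c :: x :: tx := by simpa using hlc.symm
      obtain ⟨tn, rfl⟩ := chainL_head bones _ n l hl
      simp only [List.tail_cons] at hh ⊢
      rcases List.suffix_cons_iff.mp hsuf with heq | hsuf'
      · -- whole list: tail is x :: tx
        obtain ⟨rfl, rfl⟩ : n = c ∧ tn = x :: tx := by
          constructor <;> [skip; skip] <;> cases heq <;> rfl
        simp
      · exact hsuf'.subset (by simp)

theorem child_unique (bones : List (String × List (String × Option String)))
    (c₁ c₂ x n : String) (i₁ i₂ : List (String × Option String)) (lx : List String)
    (hc₁ : (PySem.Dict.mk bones).get? c₁ = some i₁) (hp₁ : pyParent i₁ = some x)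
    (hc₂ : (PySem.Dict.mk bones).get? c₂ = some i₂) (hp₂ : pyParent i₂ = some x)
    (hx : chainL bones (bones.length + 1) x = some lx)
    (h₁ : n = c₁ ∨ hitsB bones n c₁ = true) (h₂ : n = c₂ ∨ hitsB bones n c₂ = true) :
    c₁ = c₂ := by
  have hcc₁ : chainL bones (bones.length + 1) c₁ = some (c₁ :: lx) :=
    chainL_cons bones c₁ x i₁ lx hc₁ hp₁ hx
  have hcc₂ : chainL bones (bones.length + 1) c₂ = some (c₂ :: lx) :=
    chainL_cons bones c₂ x i₂ lx hc₂ hp₂ hx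
  -- n's canonical chain exists in every case
  have hchain : ∃ l, chainL bones (bones.length + 1) n = some l := by
    rcases h₁ with heq | hh
    · subst heq; exact ⟨_, hcc₁⟩
    · cases hl : chainL bones (bones.length + 1) n with
      | none => rw [hitsB_of_none bones n c₁ hl] at hh; exact absurd hh (by simp)
      | some l => exact ⟨l, rfl⟩
  obtain ⟨l, hl⟩ := hchain
  have hmem : ∀ c (i : List (String × Option String)),
      (PySem.Dict.mk bones).get? c = some i → pyParent i = some x →
      chainL bones (bones.length + 1) c = some (c :: lx) →
      (n = c ∨ hitsB bones n c = true) → (c :: lx) <:+ l := by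
    intro c i hg hp hcc h
    rcases h with heq | hh
    · subst heq; rw [hl] at hcc; obtain rfl : n :: lx = l := by simpa using hcc.symm
      exact List.suffix_refl _
    · rw [hitsB_eq bones n c l hl] at hh
      simp only [decide_eq_true_eq] at hh
      obtain ⟨lc, hlc, hsuf⟩ := chain_of_mem bones n l hl c (List.mem_of_mem_tail hh)
      rw [hcc] at hlc
      obtain rfl : lc = c :: lx := by simpa using hlc.symm
      exact hsuf
  have hs₁ := hmem c₁ i₁ hc₁ hp₁ hcc₁ h₁
  have hs₂ := hmem c₂ i₂ hc₂ hp₂ hcc₂ h₂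
  have heq : c₁ :: lx = c₂ :: lx := by
    have hlen : (c₁ :: lx).length = (c₂ :: lx).length := by simp
    -- both are suffixes of l of the same length
    obtain ⟨p₁, hp₁'⟩ := hs₁
    obtain ⟨p₂, hp₂'⟩ := hs₂
    have : p₁.length = p₂.length := by
      have e1 := congrArg List.length hp₁'
      have e2 := congrArg List.length hp₂'
      simp at e1 e2; omega
    have : p₁ = p₂ := by
      have : p₁ ++ (c₁ :: lx) = p₂ ++ (c₂ :: lx) := hp₁'.trans hp₂'.symm
      exact List.append_inj_left this ‹p₁.length = p₂.length›
    subst this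
    exact List.append_cancel_left (hp₁'.trans hp₂'.symm)
  simpa using congrArg List.head? heq

theorem length_filter_or {α : Type} (L : List α) (P Q : α → Bool)
    (h : ∀ b ∈ L, ¬(P b = true ∧ Q b = true)) :
    (L.filter (fun b => P b || Q b)).length = (L.filter P).length + (L.filter Q).length := by
  induction L with
  | nil => simp
  | cons a t ih =>
    have ht := ih (fun b hb => h b (List.mem_cons_of_mem a hb))
    have ha := h a List.mem_cons_self
    by_cases hP : P a = true
    · by_cases hQ : Q a = true
      · exact absurd ⟨hP, hQ⟩ ha
      · simp [hP, hQ, ht]; omega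
    · by_cases hQ : Q a = true
      · simp [hP, hQ, ht]; omega
      · simp [hP, hQ, ht]

theorem sum_map_one_add {α : Type} (cs : List α) (f : α → Nat) :
    (cs.map (fun c => 1 + f c)).sum = cs.length + (cs.map f).sum := by
  induction cs with
  | nil => simp
  | cons c t ih => simp [ih]; omega

theorem length_filter_fst_eq (bones : List (String × List (String × Option String)))
    (hnd : (bones.map Prod.fst).Nodup) (c : String) (hc : c ∈ bones.map Prod.fst) :
    (bones.filter (fun b => b.1 == c)).length = 1 := by
  have h1 : (bones.filter (fun b => b.1 == c)).length
      = List.countP (fun b => b.1 == c) bones := List.countP_eq_length_filter.symm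
  have h2 : List.countP (fun b => b.1 == c) bones
      = List.countP (fun y => y == c) (bones.map Prod.fst) := by
    rw [List.countP_map]; rfl
  have h3 : List.countP (fun y => y == c) (bones.map Prod.fst)
      = List.count c (bones.map Prod.fst) := rfl
  rw [h1, h2, h3]
  exact List.count_eq_one_of_mem hnd hc

theorem cntN_rec (bones : List (String × List (String × Option String)))
    (hnd : (bones.map Prod.fst).Nodup) (x : String) (lx : List String)
    (hx : chainL bones (bones.length + 1) x = some lx) :
    cntN bones x = ((childrenOf bones x).map (fun c => 1 + cntN bones c)).sum := by
  -- pointwise: a bone hits x iff it lies in exactly one child's closed subtree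
  have key : ∀ b ∈ bones, hitsB bones b.1 x
      = (childrenOf bones x).any (fun c => b.1 == c || hitsB bones b.1 c) := by
    intro b _
    rw [Bool.eq_iff_iff]
    constructor
    · intro hh
      cases hl : chainL bones (bones.length + 1) b.1 with
      | none => rw [hitsB_of_none bones b.1 x hl] at hh; exact absurd hh (by simp)
      | some l =>
        rw [hitsB_eq bones b.1 x l hl] at hh
        simp only [decide_eq_true_eq] at hh
        obtain ⟨c, i, hg, hp, hor⟩ := hits_decompose bones (bones.length + 1) b.1 l hl x hh
        refine List.any_eq_true.mpr ⟨c, (mem_childrenOf bones hnd c x).mpr ⟨i, hg, hp⟩, ?_⟩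
        rcases hor with rfl | hhits
        · simp
        · simp [hhits]
    · intro hh
      obtain ⟨c, hcmem, hor⟩ := List.any_eq_true.mp hh
      obtain ⟨i, hg, hp⟩ := (mem_childrenOf bones hnd c x).mp hcmem
      refine hits_of_child bones c x b.1 i lx hg hp hx ?_
      rcases Bool.or_eq_true_iff.mp hor with he | hhits
      · exact Or.inl (by simpa using he)
      · exact Or.inr hhits
  have aux : ∀ cs : List String, cs.Nodup →
      (∀ c ∈ cs, ∃ i, (PySem.Dict.mk bones).get? c = some i ∧ pyParent i = some x) →
      (bones.filter (fun b => cs.any (fun c => b.1 == c || hitsB bones b.1 c))).length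
        = (cs.map (fun c => 1 + cntN bones c)).sum := by
    intro cs
    induction cs with
    | nil => intro _ _; simp
    | cons c t ih =>
      intro hndc hch
      obtain ⟨i, hg, hp⟩ := hch c List.mem_cons_self
      have hsplit : (bones.filter
            (fun b => (c :: t).any (fun c => b.1 == c || hitsB bones b.1 c))).length
          = (bones.filter (fun b => b.1 == c || hitsB bones b.1 c)).length
            + (bones.filter (fun b => t.any (fun c => b.1 == c || hitsB bones b.1 c))).length := by
        rw [show (fun (b : String × List (String × Option String)) =>
            (c :: t).any (fun c => b.1 == c || hitsB bones b.1 c))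
          = (fun b => (b.1 == c || hitsB bones b.1 c)
              || t.any (fun c => b.1 == c || hitsB bones b.1 c)) from funext (fun b => by
                simp [List.any_cons])]
        refine length_filter_or bones _ _ ?_
        rintro b _ ⟨h1, h2⟩
        obtain ⟨c', hc't, hor'⟩ := List.any_eq_true.mp h2
        obtain ⟨i', hg', hp'⟩ := hch c' (List.mem_cons_of_mem c hc't)
        have : c = c' := by
          refine child_unique bones c c' x b.1 i i' lx hg hp hg' hp' hx ?_ ?_
          · rcases Bool.or_eq_true_iff.mp h1 with he | hhits
            · exact Or.inl (by simpa using he)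
            · exact Or.inr hhits
          · rcases Bool.or_eq_true_iff.mp hor' with he | hhits
            · exact Or.inl (by simpa using he)
            · exact Or.inr hhits
        exact (List.nodup_cons.mp hndc).1 (this ▸ hc't)
      have hone : (bones.filter (fun b => b.1 == c || hitsB bones b.1 c)).length
          = 1 + cntN bones c := by
        rw [length_filter_or bones _ _ (by
          rintro b _ ⟨h1, h2⟩
          have hbc : b.1 = c := by simpa using h1
          rw [hbc] at h2
          rw [not_hitsB_self bones c] at h2
          exact absurd h2 (by simp))]
        have hcn : c ∈ bones.map Prod.fst :=
          List.mem_map_of_mem (f := Prod.fst) (PySem.Dict.mem_items_of_get?_eq_some (d := PySem.Dict.mk bones) (k := c) (v := i) hg)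
        rw [length_filter_fst_eq bones hnd c hcn]
        rfl
      rw [hsplit, hone, ih (List.nodup_cons.mp hndc).2
        (fun c' hc' => hch c' (List.mem_cons_of_mem c hc'))]
      simp
  calc cntN bones x
      = (bones.filter (fun b =>
          (childrenOf bones x).any (fun c => b.1 == c || hitsB bones b.1 c))).length := by
        unfold cntN
        congr 1
        exact List.filter_congr key
    _ = ((childrenOf bones x).map (fun c => 1 + cntN bones c)).sum :=
        aux (childrenOf bones x) (nodup_childrenOf bones hnd x)
          (fun c hc => (mem_childrenOf bones hnd c x).mp hc)

theorem foldl_push_count (cs : List String) :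
    ∀ (c : Int) (rest : List String),
      cs.foldl (fun (s : Int × List String) child => (s.1 + 1, child :: s.2)) (c, rest)
        = (c + cs.length, cs.reverse ++ rest) := by
  induction cs with
  | nil => intro c rest; simp
  | cons x t ih =>
    intro c rest
    simp only [List.foldl_cons, ih, List.length_cons, List.reverse_cons, List.append_assoc,
      List.singleton_append, Prod.mk.injEq]
    exact ⟨by push_cast; ring, trivial⟩

theorem buildChildren_pairs :
    ∀ (bs : List (String × List (String × Option String))) (d : PySem.Dict String (List String)),
      bs.foldl
        (fun m p =>
          match pyParent p.2 with
          | none => m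
          | some par => m.modify par [] (· ++ [p.1])) d
      = (bs.filterMap (fun b => (pyParent b.2).map (fun par => (par, b.1)))).foldl
          (fun m p => m.modify p.1 [] (· ++ [p.2])) d := by
  intro bs
  induction bs with
  | nil => intro d; rfl
  | cons b t ih =>
    intro d
    cases hp : pyParent b.2 with
    | none => simp only [List.foldl_cons, List.filterMap_cons, hp, Option.map_none]; exact ih d
    | some par =>
      simp only [List.foldl_cons, List.filterMap_cons, hp, Option.map_some]
      exact ih _

theorem getD_buildChildren (bones : List (String × List (String × Option String)))
    (x : String) : (buildChildren bones).getD x [] = childrenOf bones x := by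
  unfold buildChildren
  rw [buildChildren_pairs bones PySem.Dict.empty,
    PySem.Dict.getD_foldl_modify_append]
  have : ∀ bs : List (String × List (String × Option String)),
      ((bs.filterMap (fun b => (pyParent b.2).map (fun par => (par, b.1)))).filter
        (fun p => p.1 == x)).map (fun p => p.2)
      = childrenOf bs x := by
    intro bs
    induction bs with
    | nil => rfl
    | cons b t ih =>
      cases hp : pyParent b.2 with
      | none =>
        simp only [List.filterMap_cons, hp, Option.map_none, childrenOf, List.filter_cons]
        simp only [childrenOf] at ih ⊢
        simp [ih]
      | some par =>
        by_cases hpar : par = x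
        · subst hpar
          simp only [List.filterMap_cons, hp, Option.map_some, childrenOf, List.filter_cons]
          simp only [childrenOf] at ih
          simp [ih]
        · simp only [List.filterMap_cons, hp, Option.map_some, childrenOf, List.filter_cons]
          simp only [childrenOf] at ih
          simp [hpar, ih]
  simpa using this bones

theorem dfsA_counts (bones : List (String × List (String × Option String)))
    (hnd : (bones.map Prod.fst).Nodup) :
    ∀ (fuel : Nat) (stack : List String) (c : Int),
      (∀ y ∈ stack, ∃ l, chainL bones (bones.length + 1) y = some l) →
      (stack.map (fun y => 1 + cntN bones y)).sum ≤ fuel →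
      dfsA (buildChildren bones) fuel stack c
        = c + ((stack.map (fun y => (cntN bones y : Int))).sum) := by
  intro fuel
  induction fuel with
  | zero =>
    intro stack c hinv hfuel
    cases stack with
    | nil => simp [dfsA]
    | cons y t => simp at hfuel
  | succ fuel ih =>
    intro stack c hinv hfuel
    cases stack with
    | nil => simp [dfsA]
    | cons y t =>
      obtain ⟨ly, hly⟩ := hinv y List.mem_cons_self
      have hrec := cntN_rec bones hnd y ly hly
      show dfsA (buildChildren bones) (fuel + 1) (y :: t) c = _
      rw [dfsA]
      simp only [getD_buildChildren bones y, foldl_push_count]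
      have hchild : ∀ c' ∈ childrenOf bones y,
          ∃ l, chainL bones (bones.length + 1) c' = some l := by
        intro c' hc'
        obtain ⟨i, hg, hp⟩ := (mem_childrenOf bones hnd c' y).mp hc'
        exact ⟨c' :: ly, chainL_cons bones c' y i ly hg hp hly⟩
      have hinv' : ∀ z ∈ (childrenOf bones y).reverse ++ t,
          ∃ l, chainL bones (bones.length + 1) z = some l := by
        intro z hz
        rcases List.mem_append.mp hz with hz' | hz'
        · exact hchild z (List.mem_reverse.mp hz')
        · exact hinv z (List.mem_cons_of_mem y hz')
      have hsum_children :
          (((childrenOf bones y).reverse ++ t).map (fun z => 1 + cntN bones z)).sum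
            = cntN bones y + (t.map (fun z => 1 + cntN bones z)).sum := by
        rw [List.map_append, List.sum_append, List.map_reverse, List.sum_reverse]
        rw [hrec]
      have hfuel' :
          (((childrenOf bones y).reverse ++ t).map (fun z => 1 + cntN bones z)).sum ≤ fuel := by
        rw [hsum_children]
        simp only [List.map_cons, List.sum_cons] at hfuel
        omega
      rw [ih _ _ hinv' hfuel']
      -- arithmetic: c + |children| + (Σ children + Σ rest) = c + cnt y + Σ rest
      rw [List.map_append, List.sum_append, List.map_reverse, List.sum_reverse]
      have hcast : (cntN bones y : Int)
          = (childrenOf bones y).length + (((childrenOf bones y).map (fun z => (cntN bones z : Int))).sum) := by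
        have := hrec
        rw [sum_map_one_add] at this
        have h2 : (((childrenOf bones y).map (fun z => (cntN bones z : Int))).sum)
            = (((childrenOf bones y).map (fun z => cntN bones z)).sum : Nat) := by
          induction childrenOf bones y with
          | nil => simp
          | cons a t ih' => simp [ih']
        rw [h2]
        exact_mod_cast this
      simp only [List.map_cons, List.sum_cons]
      rw [hcast]
      ring

theorem chain_root_eq_chainL (bones : List (String × List (String × Option String))) :
    ∀ (f : Nat) (n : String),
      chain_root bones f n = (chainL bones f n).bind List.getLast? := by
  intro f
  induction f with
  | zero => intro n; rfl
  | succ f ih =>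
    intro n
    cases hi : (PySem.Dict.mk bones).get? n with
    | none => simp [chain_root, chainL, hi]
    | some info =>
      cases hp : pyParent info with
      | none => simp [chain_root, chainL, hi, hp]
      | some p =>
        simp only [chain_root, chainL, hi, hp, ih p]
        cases hc : chainL bones f p with
        | none => simp
        | some l =>
          obtain ⟨t, rfl⟩ := chainL_head bones f p l hc
          simp [List.getLast?_cons_cons]

theorem hits_root_iff (bones : List (String × List (String × Option String)))
    (r : String) (i : List (String × Option String))
    (hr : (PySem.Dict.mk bones).get? r = some i) (hp : pyParent i = none) (n : String) :
    hitsB bones n r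
      = ((chain_root bones (bones.length + 1) n == some r) && !(n == r)) := by
  rw [chain_root_eq_chainL]
  cases hl : chainL bones (bones.length + 1) n with
  | none => simp [hitsB_of_none bones n r hl]
  | some l =>
    rw [hitsB_eq bones n r l hl]
    obtain ⟨t, rfl⟩ := chainL_head bones _ n l hl
    rw [Bool.eq_iff_iff]
    simp only [List.tail_cons, decide_eq_true_eq, Option.bind_some, Bool.and_eq_true,
      beq_iff_eq, Bool.not_eq_eq_eq_not, Bool.not_true, beq_eq_false_iff_ne, ne_eq]
    constructor
    · intro hmem
      have hnd' := chainL_nodup bones _ n _ hl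
      have hne : n ≠ r := by
        intro heq; subst heq
        exact (List.nodup_cons.mp hnd').1 hmem
      obtain ⟨lc, hlc, hsuf⟩ := chain_of_mem bones n _ hl r (List.mem_cons_of_mem n hmem)
      rw [chainL_root bones r i hr hp bones.length] at hlc
      obtain rfl : lc = [r] := by simpa using hlc.symm
      obtain ⟨pre, hpre⟩ := hsuf
      constructor
      · rw [← hpre]
        simp [List.getLast?_append]
      · exact hne
    · rintro ⟨hlast, hne⟩
      cases t with
      | nil => simp at hlast; exact absurd hlast hne
      | cons a t' =>
        rw [List.getLast?_cons_cons] at hlast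
        have : r ∈ a :: t' := by
          have := List.mem_of_getLast? (l := a :: t') (a := r) hlast
          exact this
        exact this

def tagB (bones : List (String × List (String × Option String)))
    (b : String × List (String × Option String)) : Option String :=
  match chain_root bones (bones.length + 1) b.1 with
  | some r => if r != b.1 then some r else none
  | none => none

theorem countsB_foldl_eq (bones : List (String × List (String × Option String)))
    (d : PySem.Dict String Int) :
    bones.foldl
      (fun d p =>
        match chain_root bones (bones.length + 1) p.1 with
        | some r => if r != p.1 then d.modify r 0 (· + 1) else d
        | none => d)
      d
    = (bones.filterMap (tagB bones)).foldl (fun d x => d.modify x 0 (· + 1)) d := by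
  suffices h : ∀ (bs : List (String × List (String × Option String)))
      (d : PySem.Dict String Int),
      bs.foldl
        (fun d p =>
          match chain_root bones (bones.length + 1) p.1 with
          | some r => if r != p.1 then d.modify r 0 (· + 1) else d
          | none => d)
        d
      = (bs.filterMap (tagB bones)).foldl (fun d x => d.modify x 0 (· + 1)) d from
    h bones d
  intro bs
  induction bs with
  | nil => intro d; rfl
  | cons b t ih =>
    intro d
    cases hc : chain_root bones (bones.length + 1) b.1 with
    | none => simp only [List.foldl_cons, List.filterMap_cons, tagB, hc]; exact ih d
    | some r =>
      by_cases hne : (r != b.1) = true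
      · simp only [List.foldl_cons, List.filterMap_cons, tagB, hc, hne, if_true]
        exact ih _
      · have hne' : (r != b.1) = false := by simpa using hne
        simp only [List.foldl_cons, List.filterMap_cons, tagB, hc, hne', Bool.false_eq_true,
          if_false]
        exact ih d

-- count of a root among the tags = number of bones hitting it
theorem count_tagB (bones : List (String × List (String × Option String)))
    (r : String) (i : List (String × Option String))
    (hr : (PySem.Dict.mk bones).get? r = some i) (hp : pyParent i = none) :
    List.count r (bones.filterMap (tagB bones)) = cntN bones r := by
  rw [List.count, List.countP_filterMap, cntN, ← List.countP_eq_length_filter]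
  apply List.countP_congr
  intro b _
  have hiff := hits_root_iff bones r i hr hp b.1
  rw [Bool.eq_iff_iff] at hiff ⊢
  rw [hiff]
  simp only [tagB]
  cases hc : chain_root bones (bones.length + 1) b.1 with
  | none => simp
  | some r' =>
    by_cases hrb : r' = b.1
    · subst hrb
      by_cases hrr : b.1 = r
      · simp [hrr]
      · simp
    · have hne' : (r' != b.1) = true := by simpa using hrb
      by_cases hrr : r' = r
      · subst hrr
        simp [hne']
        exact fun h => hrb h.symm
      · simp [hne', hrr]

theorem foldl_congr_P {β : Type} (P : Option β → Prop) (f g : Option β → β → Option β) :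
    ∀ (l : List β) (a : Option β), P a →
      (∀ b x, x ∈ l → P b → f b x = g b x) →
      (∀ b x, x ∈ l → P b → P (f b x)) →
      l.foldl f a = l.foldl g a := by
  intro l
  induction l with
  | nil => intro a _ _ _; rfl
  | cons x t ih =>
    intro a ha hfg hP
    have hmem : x ∈ x :: t := by simp
    have hstep := hfg a x hmem ha
    rw [List.foldl_cons, List.foldl_cons, hstep]
    exact ih (g a x) (hstep ▸ hP a x hmem ha)
      (fun b y hy hb => hfg b y (by simp [hy]) hb)
      (fun b y hy hb => hP b y (by simp [hy]) hb)

theorem max2?_congr_mem {α : Type} (l : List α) (k1 k1' : α → Int) (k2 : α → Int)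
    (h : ∀ x ∈ l, k1 x = k1' x) :
    PySem.List.max2? l k1 k2 = PySem.List.max2? l k1' k2 := by
  unfold PySem.List.max2?
  refine foldl_congr_P (fun a => ∀ m, a = some m → m ∈ l) _ _ l none
    (fun m hm => by cases hm) ?_ ?_
  · intro b x hx hb
    cases b with
    | none => rfl
    | some m =>
      have hm : m ∈ l := hb m rfl
      simp only [h m hm, h x hx]
  · intro b x hx hb
    cases b with
    | none =>
      intro m hm
      simp only at hm
      cases hm; exact hx
    | some m' =>
      intro m hm
      simp only at hm
      split at hm <;> cases hm
      · exact hx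
      · exact hb m' rfl

theorem mem_top_level (bones : List (String × List (String × Option String)))
    (hnd : (bones.map Prod.fst).Nodup) (n : String)
    (hn : n ∈ (bones.filter (fun p => (pyParent p.2).isNone)).map Prod.fst) :
    ∃ i, (PySem.Dict.mk bones).get? n = some i ∧ pyParent i = none := by
  simp only [List.mem_map, List.mem_filter] at hn
  obtain ⟨b, ⟨hb, hpar⟩, rfl⟩ := hn
  refine ⟨b.2, ?_, by simpa [Option.isNone_iff_eq_none] using hpar⟩
  exact (PySem.Dict.get?_eq_some_iff_mem_items (PySem.Dict.mk bones) b.1 b.2 hnd).mpr hb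


theorem get?_foldl_insertf (f : String → Int) :
    ∀ (l : List String) (d : PySem.Dict String Int) (n : String), n ∉ l →
      (l.foldl (fun d x => d.insert x (f x)) d).get? n = d.get? n := by
  intro l
  induction l with
  | nil => intro d n _; rfl
  | cons x t ih =>
    intro d n hn
    simp only [List.mem_cons, not_or] at hn
    simp only [List.foldl_cons, ih _ _ hn.2]
    exact PySem.Dict.get?_insert_of_ne d (f x) hn.1

theorem getD_foldl_insertf (f : String → Int) :
    ∀ (l : List String) (d : PySem.Dict String Int) (n : String), n ∈ l →
      (l.foldl (fun d x => d.insert x (f x)) d).getD n 0 = f n := by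
  intro l
  induction l with
  | nil => intro d n hn; simp at hn
  | cons x t ih =>
    intro d n hn
    by_cases ht : n ∈ t
    · simp only [List.foldl_cons, ih _ _ ht]
    · have hx : n = x := by rcases List.mem_cons.mp hn with h | h; exact h; exact absurd h ht
      subst hx
      simp only [List.foldl_cons, PySem.Dict.getD_eq_get?_getD, get?_foldl_insertf f t _ _ ht,
        PySem.Dict.get?_insert_self, Option.getD_some]

theorem findRoot_eq (l : List String) :
    findRoot l = l.find? (fun n => n == "root" || n == "Root") := by
  induction l with
  | nil => rfl
  | cons n t ih =>
    simp only [findRoot, List.find?_cons, ih]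
    by_cases h : (n == "root" || n == "Root") = true <;> simp [h]

-- the two key functions agree on members of top_level
theorem keys_agree (bones : List (String × List (String × Option String)))
    (hnd : (bones.map Prod.fst).Nodup) (n : String)
    (hn : n ∈ (bones.filter (fun p => (pyParent p.2).isNone)).map Prod.fst) :
    count_descendants bones n
      = ((bones.filterMap (tagB bones)).foldl (fun d x => d.modify x 0 (· + 1))
          (((bones.filter (fun p => (pyParent p.2).isNone)).map Prod.fst).foldl
            (fun d n => d.insert n 0) (PySem.Dict.empty : PySem.Dict String Int))).getD n 0 := by
  obtain ⟨i, hg, hp⟩ := mem_top_level bones hnd n hn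
  have hchain : chainL bones (bones.length + 1) n = some [n] := by
    have := chainL_root bones n i hg hp bones.length
    simpa using this
  have hA : count_descendants bones n = (cntN bones n : Int) := by
    unfold count_descendants
    rw [dfsA_counts bones hnd (bones.length + 1) [n] 0
      (by intro y hy; rcases List.mem_cons.mp hy with heq | hy'
          · exact heq ▸ ⟨[n], hchain⟩
          · simp at hy')
      (by simp only [List.map_cons, List.map_nil, List.sum_cons, List.sum_nil]
          have : cntN bones n ≤ bones.length := by
            unfold cntN
            exact le_trans (List.length_filter_le _ _) (le_refl _)
          omega)]
    simp
  have hB : (((bones.filter (fun p => (pyParent p.2).isNone)).map Prod.fst).foldl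
      (fun d n => d.insert n 0) (PySem.Dict.empty : PySem.Dict String Int)).getD n 0 = 0 :=
    getD_foldl_insertf (fun _ => (0 : Int)) _ _ n hn
  rw [hA, PySem.Dict.getD_foldl_modify_add_one, hB,
    count_tagB bones n i hg hp]
  simp

-- ===== VERDICT (by name: the statement is the Claim_ definition above) =====
theorem find_orphan_bones_spec : Claim_equal_find_orphan_bones := by
  intro bones _ hpre
  obtain ⟨hnd, -⟩ := hpre
  unfold Spec_find_orphan_bones find_orphan_bones find_orphan_bones_alt
  set top_level := (bones.filter (fun p => (pyParent p.2).isNone)).map Prod.fst with htl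
  by_cases hlen : top_level.length ≤ 1
  · simp [hlen]
  · simp only [hlen, if_false]
    rw [findRoot_eq]
    cases hf : top_level.find? (fun n => n == "root" || n == "Root") with
    | some nr => rfl
    | none =>
      refine congrArg (fun primary =>
        PySem.List.sorted (top_level.filter (fun n => !(n == primary))) (fun s => s)) ?_
      have hkeys : ∀ n ∈ top_level,
          (top_level.foldl (fun d n => d.insert n (count_descendants bones n))
            PySem.Dict.empty).getD n 0
          = ((bones.filterMap (tagB bones)).foldl (fun d x => d.modify x 0 (· + 1))
              (top_level.foldl (fun d n => d.insert n 0) PySem.Dict.empty)).getD n 0 := by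
        intro n hn
        rw [getD_foldl_insertf (fun n => count_descendants bones n) top_level _ n hn]
        exact keys_agree bones hnd n hn
      rw [max2?_congr_mem top_level _ _ negOrd hkeys]
      rw [countsB_foldl_eq bones]
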